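-- pv_equiv track=rewrite | github.com/violet-luo/leetcode | 91_2p/Karat. Flippy.py | reversi
-- ===== SOURCE A (Python) =====
-- def reversi(board):
--     maxLen, idx, l = 0, 0, 0
--
--     for r in range(len(board)):
--         if board[r] == 'O': #找到第一个空
--             continue
--
--         while l < r:
--             if board[l] == 'X' and board[r] == ' ':
--                 curLen = (r - l - 1) # 中间O的数量
--                 if curLen > maxLen:
--                     maxLen = curLen
--                     idx = r
--
--             if board[l] == ' ' and board[r] == 'X':
--                 curLen = (r - l - 1)
--                 if curLen > maxLen:
--                     maxLen = curLen
--                     idx = l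
--
--             l += 1 #将l带到R
--
--     return [idx, maxLen] if idx or maxLen else [None, None]
-- ===== SOURCE B (Python) =====
-- def reversi(board):
--     maxLen, idx = 0, 0
--     prev = None  # (index, char) of the last non-'O' cell seen
--     for i, c in enumerate(board):
--         if c == 'O':
--             continue
--         if prev is not None:
--             pi, pc = prev
--             if (pc == 'X' and c == ' ') or (pc == ' ' and c == 'X'):
--                 gap = i - pi - 1
--                 if gap > maxLen:
--                     maxLen = gap
--                     idx = i if c == ' ' else pi
--         prev = (i, c)
--     return [idx, maxLen] if idx or maxLen else [None, None]
-- ===== Notes on version B (the rewrite author's own statement) =====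
-- stated objective: simpler
-- what changed: Replaces the nested for/while scan with a persistent left pointer and repeated board[l] lookups by a single forward pass that keeps only the (index, char) of the previously seen non-'O' cell and compares each new marker against it.
import Mathlib
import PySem

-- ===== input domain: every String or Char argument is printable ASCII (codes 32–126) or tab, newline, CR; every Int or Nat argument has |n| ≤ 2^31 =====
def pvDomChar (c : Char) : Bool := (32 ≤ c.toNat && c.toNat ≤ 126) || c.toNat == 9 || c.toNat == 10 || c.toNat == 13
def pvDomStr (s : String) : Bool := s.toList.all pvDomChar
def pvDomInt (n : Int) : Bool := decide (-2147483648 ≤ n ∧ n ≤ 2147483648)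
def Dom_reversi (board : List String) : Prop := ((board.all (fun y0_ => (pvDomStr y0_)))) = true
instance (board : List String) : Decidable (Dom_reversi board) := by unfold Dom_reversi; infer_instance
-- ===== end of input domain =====

-- B replaces A's nested for/while scan (persistent left pointer) by a single forward pass
-- remembering only the previously seen non-'O' cell; objective: simpler.

-- ===== PORT A =====
-- inner 'while l < r' loop of A: state (maxLen, idx, l); r - l decreases each step
def reversiInner (board : List String) (r : Nat) (l : Nat) (m i : Int) : Int × Int × Nat :=
  if l < r then
    let s1 : Int × Int :=
      if board.getD l "" = "X" ∧ board.getD r "" = " " then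
        (if (r : Int) - l - 1 > m then ((r : Int) - l - 1, (r : Int)) else (m, i))
      else (m, i)
    let s2 : Int × Int :=
      if board.getD l "" = " " ∧ board.getD r "" = "X" then
        (if (r : Int) - l - 1 > s1.1 then ((r : Int) - l - 1, (l : Int)) else s1)
      else s1
    reversiInner board r (l + 1) s2.1 s2.2
  else (m, i, l)
termination_by r - l

def reversi (board : List String) : List (Option Int) :=
  let st :=
    (List.range board.length).foldl
      (fun (st : Int × Int × Nat) r =>
        if board.getD r "" = "O" then st
        else reversiInner board r st.2.2 st.1 st.2.1)
      (0, 0, 0)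
  if st.2.1 ≠ 0 ∨ st.1 ≠ 0 then [some st.2.1, some st.1] else [none, none]

-- ===== PORT B =====
def reversi_alt (board : List String) : List (Option Int) :=
  let st :=
    (PySem.List.enumerate board 0).foldl
      (fun (st : Int × Int × Option (Int × String)) ic =>
        if ic.2 = "O" then st
        else
          let mi : Int × Int :=
            match st.2.2 with
            | none => (st.1, st.2.1)
            | some (pi, pc) =>
              if (pc = "X" ∧ ic.2 = " ") ∨ (pc = " " ∧ ic.2 = "X") then
                let gap : Int := ic.1 - pi - 1
                if gap > st.1 then (gap, if ic.2 = " " then ic.1 else pi)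
                else (st.1, st.2.1)
              else (st.1, st.2.1)
          (mi.1, mi.2, some (ic.1, ic.2)))
      (0, 0, none)
  if st.2.1 ≠ 0 ∨ st.1 ≠ 0 then [some st.2.1, some st.1] else [none, none]

-- ===== PRECONDITION & SPEC =====
def Spec_reversi (board : List String) (out : List (Option Int)) : Prop := out = reversi_alt board
instance (board : List String) (out : List (Option Int)) : Decidable (Spec_reversi board out) := by unfold Spec_reversi; infer_instance

-- ===== CLAIM (what is proved, stated in full; the proofs are below) =====
def Claim_equal_reversi : Prop := ∀ (board : List String), Dom_reversi board → Spec_reversi board (reversi board)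

-- ===== LEMMAS AND PROOFS =====

def stepA (board : List String) (st : Int × Int × Nat) (r : Nat) : Int × Int × Nat :=
  if board.getD r "" = "O" then st
  else reversiInner board r st.2.2 st.1 st.2.1

def stepB (board : List String) (st : Int × Int × Option (Int × String)) (ic : Int × String) :
    Int × Int × Option (Int × String) :=
  if ic.2 = "O" then st
  else
    let mi : Int × Int :=
      match st.2.2 with
      | none => (st.1, st.2.1)
      | some (pi, pc) =>
        if (pc = "X" ∧ ic.2 = " ") ∨ (pc = " " ∧ ic.2 = "X") then
          let gap : Int := ic.1 - pi - 1
          if gap > st.1 then (gap, if ic.2 = " " then ic.1 else pi)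
          else (st.1, st.2.1)
        else (st.1, st.2.1)
    (mi.1, mi.2, some (ic.1, ic.2))

-- relation between A's state and B's state after processing indices [0, n)
def RInv (board : List String) (n : Nat) (a : Int × Int × Nat)
    (b : Int × Int × Option (Int × String)) : Prop :=
  a.1 = b.1 ∧ a.2.1 = b.2.1 ∧
  (match b.2.2 with
   | none => a.2.2 = 0 ∧ ∀ j : Nat, j < n → board.getD j "" = "O"
   | some (p, pc) => ∃ pn : Nat, p = (pn : Int) ∧ a.2.2 = pn ∧ pn < n ∧
       board.getD pn "" = pc ∧ pc ≠ "O" ∧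
       ∀ j : Nat, pn < j → j < n → board.getD j "" = "O")

lemma innerA_all_O (board : List String) (r : Nat) :
    ∀ d l m i, r - l = d → l ≤ r → (∀ j : Nat, l ≤ j → j < r → board.getD j "" = "O") →
    reversiInner board r l m i = (m, i, r) := by
  intro d
  induction d with
  | zero =>
    intro l m i hd hle hO
    have : l = r := by omega
    rw [reversiInner]
    simp [this]
  | succ d ih =>
    intro l m i hd hle hO
    have h : l < r := by omega
    have hol : board.getD l "" = "O" := hO l le_rfl h
    have h1 : ¬ (board.getD l "" = "X" ∧ board.getD r "" = " ") := by
      rintro ⟨hx, _⟩; rw [hol] at hx; exact absurd hx (by decide)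
    have h2 : ¬ (board.getD l "" = " " ∧ board.getD r "" = "X") := by
      rintro ⟨hx, _⟩; rw [hol] at hx; exact absurd hx (by decide)
    rw [reversiInner]
    simp only [h, if_true, if_neg h1, if_neg h2]
    exact ih (l + 1) m i (by omega) (by omega) (fun j hj1 hj2 => hO j (by omega) hj2)

lemma innerA_pair (board : List String) (r l : Nat) (m i : Int)
    (hlr : l < r) (hO : ∀ j : Nat, l < j → j < r → board.getD j "" = "O") :
    reversiInner board r l m i =
      (let s1 : Int × Int :=
        if board.getD l "" = "X" ∧ board.getD r "" = " " then
          (if (r : Int) - l - 1 > m then ((r : Int) - l - 1, (r : Int)) else (m, i))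
        else (m, i)
       let s2 : Int × Int :=
        if board.getD l "" = " " ∧ board.getD r "" = "X" then
          (if (r : Int) - l - 1 > s1.1 then ((r : Int) - l - 1, (l : Int)) else s1)
        else s1
       (s2.1, s2.2, r)) := by
  rw [reversiInner]
  simp only [hlr, if_true]
  exact innerA_all_O board r (r - (l + 1)) (l + 1) _ _ rfl hlr
    (fun j hj1 hj2 => hO j (by omega) hj2)

lemma inv_step (board : List String) (n : Nat) (a : Int × Int × Nat)
    (b : Int × Int × Option (Int × String)) (h : RInv board n a b) :
    RInv board (n + 1) (stepA board a n) (stepB board b ((n : Int), board.getD n "")) := by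
  obtain ⟨h1, h2, h3⟩ := h
  by_cases hc : board.getD n "" = "O"
  · -- 'O' cell: both steps are the identity; extend the all-'O' range by one
    simp only [stepA, stepB, hc, if_pos, if_true]
    refine ⟨h1, h2, ?_⟩
    match hb : b.2.2 with
    | none =>
      rw [hb] at h3
      exact ⟨h3.1, fun j hj => by rcases Nat.lt_succ_iff_lt_or_eq.mp hj with h | h
                                  · exact h3.2 j h
                                  · simpa [h] using hc⟩
    | some (p, pc) =>
      rw [hb] at h3
      obtain ⟨pn, hp, ha, hlt, hbd, hne, hO⟩ := h3
      exact ⟨pn, hp, ha, by omega, hbd, hne,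
        fun j hj1 hj2 => by rcases Nat.lt_succ_iff_lt_or_eq.mp hj2 with h | h
                            · exact hO j hj1 h
                            · simpa [h] using hc⟩
  · simp only [stepA, stepB, hc, if_false, if_neg hc]
    match hb : b.2.2 with
    | none =>
      rw [hb] at h3
      obtain ⟨ha0, hallO⟩ := h3
      rw [ha0]
      rw [innerA_all_O board n (n - 0) 0 a.1 a.2.1 rfl (Nat.zero_le n)
        (fun j hj1 hj2 => hallO j hj2)]
      exact ⟨h1, h2, n, rfl, rfl, Nat.lt_succ_self n, rfl, hc,
        fun j hj1 hj2 => by omega⟩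
    | some (p, pc) =>
      rw [hb] at h3
      obtain ⟨pn, hp, ha, hlt, hbd, hne, hO⟩ := h3
      rw [ha, innerA_pair board n pn a.1 a.2.1 hlt hO]
      refine ⟨?_, ?_, n, rfl, rfl, Nat.lt_succ_self n, rfl, hc,
        fun j hj1 hj2 => by omega⟩ <;>
      · simp only [hbd, hp, h1, h2]
        by_cases hx : pc = "X" ∧ board.getD n "" = " " <;>
          by_cases hy : pc = " " ∧ board.getD n "" = "X"
        · exact absurd (hx.2.symm.trans hy.2) (by decide)
        · simp only [List.getD] at hx hy ⊢; simp_all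
        · simp only [List.getD] at hx hy ⊢; simp_all
        · simp only [List.getD] at hx hy ⊢; simp [hx, hy]

lemma enum_eq (board : List String) : PySem.List.enumerate board 0
    = (List.range board.length).map (fun (k : Nat) => ((k : Int), board.getD k "")) := by
  rw [PySem.List.enumerate_eq_map_pyRange (d := ""), PySem.List.pyRange_one]
  simp [List.map_map, Function.comp, PySem.List.pyGetD_natCast]

lemma inv_fold (board : List String) (n : Nat) :
    RInv board n
      ((List.range n).foldl (stepA board) (0, 0, 0))
      (((List.range n).map (fun (k : Nat) => ((k : Int), board.getD k ""))).foldl (stepB board) (0, 0, none)) := by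
  induction n with
  | zero => exact ⟨rfl, rfl, rfl, by omega⟩
  | succ n ih =>
    rw [List.range_succ, List.map_append, List.foldl_append, List.foldl_append]
    exact inv_step board n _ _ ih

-- ===== VERDICT (by name: the statement is the Claim_ definition above) =====
theorem reversi_spec : Claim_equal_reversi := by
  intro board _
  unfold Spec_reversi reversi reversi_alt
  rw [enum_eq]
  change
    (let st := (List.range board.length).foldl (stepA board) (0, 0, 0)
     if st.2.1 ≠ 0 ∨ st.1 ≠ 0 then [some st.2.1, some st.1] else [none, none])
    =
    (let st := ((List.range board.length).map (fun (k : Nat) => ((k : Int), board.getD k ""))).foldl (stepB board) (0, 0, none)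
     if st.2.1 ≠ 0 ∨ st.1 ≠ 0 then [some st.2.1, some st.1] else [none, none])
  obtain ⟨h1, h2, -⟩ := inv_fold board board.length
  simp only []
  rw [h2, h1]
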